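-- pv_equiv track=rewrite | github.com/brandongregoryscott/imgavg | ImgAvg.py | partitionAvg
-- ===== SOURCE A (Python) =====
-- def partitionAvg(colors):
--     pixelCount = 0
--     avgColor = list()
--     for i in range(len(colors[0][1])):
--         avgColor.append(0)
--
--     for entry in colors:
--         count = entry[0]
--         color = entry[1]
--
--         pixelCount += count
--         for i in range(len(color)):
--             avgColor[i] += (count * color[i])
--
--     for i in range(len(avgColor)):
--         avgColor[i] = int(avgColor[i] / pixelCount)
--
--     return tuple(avgColor)
-- ===== SOURCE B (Python) =====
-- def partitionAvg(colors):
--     pixelCount = sum(count for count, _ in colors)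
--     return tuple(
--         int(sum(count * color[i] for count, color in colors) / pixelCount)
--         for i in range(len(colors[0][1]))
--     )
-- ===== Notes on version B (the rewrite author's own statement) =====
-- stated objective: alternative
-- what changed: B transposes the computation: one pass summing the pixel counts, then one channel-indexed pass that sums count*color[i] across all entries and divides, instead of A's single entry pass mutating a running per-channel accumulator list; no accumulator list is ever built or mutated.
-- outside the precondition, e.g. on partitionAvg([(1, [1, 2]), (1, [3])]): A returns (2, 1), B raises IndexError
import Mathlib
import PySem

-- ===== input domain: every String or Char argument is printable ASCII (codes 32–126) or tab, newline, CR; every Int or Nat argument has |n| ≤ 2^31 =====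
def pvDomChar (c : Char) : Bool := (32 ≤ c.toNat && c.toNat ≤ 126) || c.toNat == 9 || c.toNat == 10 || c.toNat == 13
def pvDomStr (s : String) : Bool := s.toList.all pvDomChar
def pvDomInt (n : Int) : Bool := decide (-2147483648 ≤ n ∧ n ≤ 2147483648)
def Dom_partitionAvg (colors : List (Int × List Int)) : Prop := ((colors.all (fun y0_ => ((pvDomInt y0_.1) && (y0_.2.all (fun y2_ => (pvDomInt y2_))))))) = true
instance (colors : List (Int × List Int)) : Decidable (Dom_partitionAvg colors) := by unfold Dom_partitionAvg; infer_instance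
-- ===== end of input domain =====

-- B restates the average channel-by-channel (count pass + one sum per channel) instead of A's
-- single entry pass mutating a per-channel accumulator list; same result, different decomposition.

-- ===== PORT A =====
def partitionAvg (colors : List (Int × List Int)) : List Int :=
  -- len(colors[0][1]); colors == [] raises IndexError (outside Pre_)
  let n : Int := ((PySem.List.pyGet? colors 0).map (fun e => (e.2.length : Int))).getD 0
  let avgColor0 : List Int :=
    (PySem.List.pyRange 0 n 1).foldl (fun acc _ => acc ++ [(0 : Int)]) []
  let st : Int × List Int := colors.foldl
    (fun s entry =>
      let count := entry.1
      let color := entry.2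
      let pixelCount := s.1 + count
      let avgColor := (PySem.List.pyRange 0 (color.length : Int) 1).foldl
        (fun a i => PySem.List.pySetD a i
          (PySem.List.pyGetD a i 0 + count * PySem.List.pyGetD color i 0)) s.2
      (pixelCount, avgColor))
    (0, avgColor0)
  -- int(a / b): PySem.Int.truncdiv, the PySem primitive for Python's int(a / b)
  (PySem.List.pyRange 0 (st.2.length : Int) 1).foldl
    (fun a i => PySem.List.pySetD a i
      (PySem.Int.truncdiv (PySem.List.pyGetD a i 0) st.1)) st.2

-- ===== PORT B =====
def partitionAvg_alt (colors : List (Int × List Int)) : List Int :=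
  let pixelCount := (colors.map (fun e : Int × List Int => e.1)).sum
  (List.range (colors.headD (0, [])).2.length).map
    (fun i : Nat => PySem.Int.truncdiv
      ((colors.map (fun e => e.1 * PySem.List.pyGetD e.2 (i : Int) 0)).sum) pixelCount)

-- ===== PRECONDITION & SPEC =====
-- Pre_ excludes: the empty list (A raises IndexError on colors[0]); entries whose color is
-- longer than the first (A raises IndexError writing past the accumulator); ragged shorter
-- entries, on which A's treating the missing channels as 0 is an accident and B raises
-- IndexError; and a zero total pixel count with >= 1 channel (A raises ZeroDivisionError).
def Pre_partitionAvg (colors : List (Int × List Int)) : Prop :=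
  colors ≠ [] ∧
  (∀ e ∈ colors, e.2.length = (colors.headD (0, [])).2.length) ∧
  ((colors.headD (0, [])).2.length = 0 ∨ (colors.map (fun e : Int × List Int => e.1)).sum ≠ 0)
instance (colors : List (Int × List Int)) : Decidable (Pre_partitionAvg colors) := by
  unfold Pre_partitionAvg; infer_instance

def pvWitness_partitionAvg : (List (Int × List Int)) := [(1, [1, 2]), (1, [3, 4])]

def Spec_partitionAvg (colors : List (Int × List Int)) (out : List Int) : Prop := out = partitionAvg_alt colors
instance (colors : List (Int × List Int)) (out : List Int) : Decidable (Spec_partitionAvg colors out) := by unfold Spec_partitionAvg; infer_instance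

-- ===== CLAIM (what is proved, stated in full; the proofs are below) =====
def Claim_equal_partitionAvg : Prop := ∀ (colors : List (Int × List Int)), Dom_partitionAvg colors → Pre_partitionAvg colors → Spec_partitionAvg colors (partitionAvg colors)

-- ===== LEMMAS AND PROOFS =====

-- A's in-place index loops 'for i in range(t): a[i] = g(i, a[i])', characterised pointwise.
lemma setLoop_spec (g : Int → Int → Int) :
    ∀ (t : Nat) (avg : List Int), t ≤ avg.length →
      (((PySem.List.pyRange 0 (t : Int) 1).foldl
          (fun a i => PySem.List.pySetD a i (g i (PySem.List.pyGetD a i 0))) avg).length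
          = avg.length ∧
       ∀ j : Nat, ((PySem.List.pyRange 0 (t : Int) 1).foldl
          (fun a i => PySem.List.pySetD a i (g i (PySem.List.pyGetD a i 0))) avg).getD j 0
          = if j < t then g (j : Int) (avg.getD j 0) else avg.getD j 0) := by
  intro t
  induction t with
  | zero =>
      intro avg _
      rw [PySem.List.pyRange_one_eq_nil (by norm_num)]
      simp
  | succ t ih =>
      intro avg h
      have ht : (((t + 1 : Nat)) : Int) = (t : Int) + 1 := by push_cast; ring
      rw [ht, PySem.List.pyRange_one_succ_right (by positivity), List.foldl_append]
      obtain ⟨ihlen, ihget⟩ := ih avg (Nat.le_of_succ_le h)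
      set r := (PySem.List.pyRange 0 (t : Int) 1).foldl
        (fun a i => PySem.List.pySetD a i (g i (PySem.List.pyGetD a i 0))) avg with hr
      have hget : PySem.List.pyGetD r ((t : Nat) : Int) 0 = avg.getD t 0 := by
        rw [PySem.List.pyGetD_natCast, ihget t]; simp
      simp only [List.foldl_cons, List.foldl_nil, hget, PySem.List.pySetD_natCast]
      constructor
      · simp [ihlen]
      · intro j
        have hset : (r.set t (g (t : Int) (avg.getD t 0))).getD j 0
            = if t = j ∧ t < r.length then g (t : Int) (avg.getD t 0) else r.getD j 0 := by
          simp only [List.getD, List.getElem?_set]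
          by_cases h1 : t = j <;> by_cases h2 : t < r.length <;>
            simp_all
        rw [hset]
        by_cases hj : j = t
        · subst hj
          simp [ihlen, Nat.lt_of_succ_le h]
        · have : ¬ (t = j ∧ t < r.length) := by omega
          rw [if_neg this, ihget j]
          by_cases hlt : j < t
          · rw [if_pos hlt, if_pos (by omega)]
          · rw [if_neg hlt, if_neg (by omega)]

-- A's entry pass, characterised pointwise.
lemma outer_spec (n : Nat) :
    ∀ (colors : List (Int × List Int)) (pc : Int) (avg : List Int),
      (∀ e ∈ colors, e.2.length = n) → avg.length = n →
      (colors.foldl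
        (fun s entry =>
          let count := entry.1
          let color := entry.2
          let pixelCount := s.1 + count
          let avgColor := (PySem.List.pyRange 0 (color.length : Int) 1).foldl
            (fun a i => PySem.List.pySetD a i
              (PySem.List.pyGetD a i 0 + count * PySem.List.pyGetD color i 0)) s.2
          (pixelCount, avgColor))
        (pc, avg)).1 = pc + (colors.map (fun e : Int × List Int => e.1)).sum ∧
      (colors.foldl
        (fun s entry =>
          let count := entry.1
          let color := entry.2
          let pixelCount := s.1 + count
          let avgColor := (PySem.List.pyRange 0 (color.length : Int) 1).foldl
            (fun a i => PySem.List.pySetD a i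
              (PySem.List.pyGetD a i 0 + count * PySem.List.pyGetD color i 0)) s.2
          (pixelCount, avgColor))
        (pc, avg)).2.length = n ∧
      ∀ j : Nat, (colors.foldl
        (fun s entry =>
          let count := entry.1
          let color := entry.2
          let pixelCount := s.1 + count
          let avgColor := (PySem.List.pyRange 0 (color.length : Int) 1).foldl
            (fun a i => PySem.List.pySetD a i
              (PySem.List.pyGetD a i 0 + count * PySem.List.pyGetD color i 0)) s.2
          (pixelCount, avgColor))
        (pc, avg)).2.getD j 0
        = if j < n then avg.getD j 0 + (colors.map (fun e : Int × List Int => e.1 * e.2.getD j 0)).sum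
          else avg.getD j 0 := by
  intro colors
  induction colors with
  | nil => intro pc avg _ h; simp [h]
  | cons e rest ih =>
      intro pc avg hrect hlen
      have he : e.2.length = n := hrect e (List.mem_cons_self)
      obtain ⟨slen, sget⟩ := setLoop_spec
        (fun i cur => cur + e.1 * PySem.List.pyGetD e.2 i 0) e.2.length avg (by omega)
      simp only [List.foldl_cons]
      set avg' := (PySem.List.pyRange 0 ((e.2.length : Nat) : Int) 1).foldl
        (fun a i => PySem.List.pySetD a i
          (PySem.List.pyGetD a i 0 + e.1 * PySem.List.pyGetD e.2 i 0)) avg with havg'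
      obtain ⟨ih1, ih2, ih3⟩ := ih (pc + e.1) avg'
        (fun x hx => hrect x (List.mem_cons_of_mem e hx)) (by rw [slen, hlen])
      refine ⟨?_, ?_, ?_⟩
      · rw [ih1]; simp [add_assoc]
      · exact ih2
      · intro j
        rw [ih3 j]
        have hg : avg'.getD j 0 = if j < n then avg.getD j 0 + e.1 * e.2.getD j 0
            else avg.getD j 0 := by
          rw [havg', sget j, he, PySem.List.pyGetD_natCast]
        by_cases hj : j < n
        · rw [if_pos hj, if_pos hj, hg, if_pos hj]
          simp
          ring
        · rw [if_neg hj, if_neg hj, hg, if_neg hj]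

-- ===== VERDICT (by name: the statement is the Claim_ definition above) =====
theorem partitionAvg_spec : Claim_equal_partitionAvg := by
  intro colors _ hpre
  obtain ⟨hne, hrect, -⟩ := hpre
  obtain ⟨c, cs, rfl⟩ := List.exists_cons_of_ne_nil hne
  simp only [List.headD_cons] at hrect
  unfold Spec_partitionAvg partitionAvg partitionAvg_alt
  simp only [PySem.List.pyGet?_zero_cons, Option.map_some, Option.getD_some,
    List.headD_cons]
  rw [PySem.List.foldl_append_singleton_eq_map (fun _ => (0 : Int)), List.nil_append,
    List.map_const']
  set n := c.2.length with hn
  have hlen0 : (List.replicate (PySem.List.pyRange 0 (n : Int) 1).length (0 : Int)).length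
      = n := by
    simp [PySem.List.length_pyRange_one]
  obtain ⟨o1, o2, o3⟩ := outer_spec n (c :: cs) 0
    (List.replicate (PySem.List.pyRange 0 (n : Int) 1).length (0 : Int)) hrect hlen0
  set st := ((c :: cs).foldl
    (fun s entry =>
      let count := entry.1
      let color := entry.2
      let pixelCount := s.1 + count
      let avgColor := (PySem.List.pyRange 0 (color.length : Int) 1).foldl
        (fun a i => PySem.List.pySetD a i
          (PySem.List.pyGetD a i 0 + count * PySem.List.pyGetD color i 0)) s.2
      (pixelCount, avgColor))
    ((0 : Int), List.replicate (PySem.List.pyRange 0 (n : Int) 1).length (0 : Int))) with hst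
  obtain ⟨flen, fget⟩ := setLoop_spec (fun _ cur => PySem.Int.truncdiv cur st.1)
    st.2.length st.2 (le_refl _)
  apply List.ext_getElem
  · rw [flen, o2]; simp
  · intro j h1 h2
    have hjn : j < n := by rw [flen, o2] at h1; exact h1
    have hA : ((PySem.List.pyRange 0 ((st.2.length : Nat) : Int) 1).foldl
        (fun a i => PySem.List.pySetD a i
          (PySem.Int.truncdiv (PySem.List.pyGetD a i 0) st.1)) st.2)[j]
        = PySem.Int.truncdiv (st.2.getD j 0) st.1 := by
      rw [← List.getD_eq_getElem _ 0 h1, fget j, if_pos (by omega : j < st.2.length)]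
    rw [hA, o3 j, if_pos hjn]
    have hz : (List.replicate (PySem.List.pyRange 0 (n : Int) 1).length (0 : Int)).getD j 0
        = 0 := by
      exact List.getD_replicate 0
        (by simpa [PySem.List.length_pyRange_one] using hjn)
    rw [hz]
    rw [List.getElem_map, List.getElem_range, o1]
    simp
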